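-- pv_equiv track=rewrite | github.com/The404Studios/Archimation | ai-control/cortex/trust_translate.py | kernel_score_to_api_band
-- ===== SOURCE A (Python) =====
-- from typing import Final
--
-- KERNEL_SCORE_MIN: Final[int] = -1000
--
-- KERNEL_SCORE_MAX: Final[int] = 1000
--
-- API_BAND_MIN: Final[int] = 0
--
-- API_BAND_TO_KERNEL_FLOOR: Final[dict[int, int]] = {
--     0:    -1000,
--     100:   -200,
--     200:      0,
--     300:    150,
--     400:    300,
--     500:    500,
--     600:    700,
--     700:    800,
--     800:    900,
--     900:   1000,
--     1000:  1000,
-- }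
--
-- _BANDS_SORTED: Final[tuple[int, ...]] = tuple(sorted(API_BAND_TO_KERNEL_FLOOR))
--
-- def _clamp(value: int, lo: int, hi: int) -> int:
--     """Clamp an ``int`` into ``[lo, hi]`` inclusive."""
--     if value < lo:
--         return lo
--     if value > hi:
--         return hi
--     return value
--
-- def _require_int(name: str, value: object) -> int:
--     """Reject non-integer inputs with a ``TypeError``.
--
--     Accepts ``bool`` grudgingly (it is an ``int`` subclass in Python) but
--     rejects ``float`` because silent truncation is how Session 41's bugs
--     started in the first place.
--     """
--     if isinstance(value, bool):
--         # bool is int, but we want a clear-cut integer caller.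
--         return int(value)
--     if isinstance(value, int):
--         return value
--     raise TypeError(
--         f"trust_translate: {name!r} must be int, got {type(value).__name__}"
--     )
--
-- def kernel_score_to_api_band(score: int) -> int:
--     """Return the highest API band whose floor ``<= score``.
--
--     The inverse of ``api_band_to_kernel_score``.  Inherently lossy because
--     API bands are discrete: many kernel scores map to the same band.
--
--     Args:
--         score: Kernel trust score.  Must be an integer.  Clamped into
--             ``[KERNEL_SCORE_MIN, KERNEL_SCORE_MAX]``.
--
--     Returns:
--         The largest defined band ``b`` such that
--         ``API_BAND_TO_KERNEL_FLOOR[b] <= score``.  Guaranteed to return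
--         a value from ``API_BAND_TO_KERNEL_FLOOR``.
--
--     Raises:
--         TypeError: if ``score`` is not an integer.
--     """
--     score_i = _require_int("score", score)
--     score_i = _clamp(score_i, KERNEL_SCORE_MIN, KERNEL_SCORE_MAX)
--
--     best = API_BAND_MIN
--     for band in _BANDS_SORTED:
--         if API_BAND_TO_KERNEL_FLOOR[band] <= score_i:
--             best = band
--         else:
--             break
--     return best
-- ===== SOURCE B (Python) =====
-- from typing import Final
--
-- KERNEL_SCORE_MIN: Final[int] = -1000
-- KERNEL_SCORE_MAX: Final[int] = 1000
-- API_BAND_MIN: Final[int] = 0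
--
-- API_BAND_TO_KERNEL_FLOOR: Final[dict[int, int]] = {
--     0:    -1000,
--     100:   -200,
--     200:      0,
--     300:    150,
--     400:    300,
--     500:    500,
--     600:    700,
--     700:    800,
--     800:    900,
--     900:   1000,
--     1000:  1000,
-- }
--
-- _BANDS_SORTED: Final[tuple[int, ...]] = tuple(sorted(API_BAND_TO_KERNEL_FLOOR))
-- _FLOORS: Final[tuple[int, ...]] = tuple(
--     API_BAND_TO_KERNEL_FLOOR[b] for b in _BANDS_SORTED
-- )
--
-- def _clamp(value: int, lo: int, hi: int) -> int:
--     if value < lo: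
--         return lo
--     if value > hi:
--         return hi
--     return value
--
-- def _require_int(name: str, value: object) -> int:
--     if isinstance(value, bool):
--         return int(value)
--     if isinstance(value, int):
--         return value
--     raise TypeError(
--         f"trust_translate: {name!r} must be int, got {type(value).__name__}"
--     )
--
-- def _bisect_right(a: tuple[int, ...], x: int) -> int:
--     """Insertion point past the last element <= x (hand-rolled bisect_right)."""
--     lo, hi = 0, len(a)
--     while lo < hi:
--         mid = (lo + hi) // 2
--         if x < a[mid]:
--             hi = mid
--         else:
--             lo = mid + 1
--     return lo
--
-- def kernel_score_to_api_band(score: int) -> int: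
--     score_i = _require_int("score", score)
--     score_i = _clamp(score_i, KERNEL_SCORE_MIN, KERNEL_SCORE_MAX)
--     # Floors are non-decreasing and _FLOORS[0] == KERNEL_SCORE_MIN <= score_i,
--     # so the insertion point is >= 1 and the band before it is the answer.
--     return _BANDS_SORTED[_bisect_right(_FLOORS, score_i) - 1]
-- ===== Notes on version B (the rewrite author's own statement) =====
-- stated objective: alternative
-- what changed: Replaces the linear scan over sorted bands (with dict lookups and early break) by a precomputed parallel floors tuple and a hand-rolled binary search (bisect_right), returning the band just before the insertion point.
import Mathlib
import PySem

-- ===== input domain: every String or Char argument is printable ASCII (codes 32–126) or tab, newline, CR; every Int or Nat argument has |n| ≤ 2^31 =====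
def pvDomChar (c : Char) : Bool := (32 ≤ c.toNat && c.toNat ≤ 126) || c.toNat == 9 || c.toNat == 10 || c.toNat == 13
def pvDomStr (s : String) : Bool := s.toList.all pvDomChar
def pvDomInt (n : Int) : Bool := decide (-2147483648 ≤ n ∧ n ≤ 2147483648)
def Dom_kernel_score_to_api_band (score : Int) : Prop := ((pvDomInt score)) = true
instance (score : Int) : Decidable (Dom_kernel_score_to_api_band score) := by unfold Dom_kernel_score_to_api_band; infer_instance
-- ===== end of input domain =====

-- B replaces A's linear scan with a break by a binary search over a precomputed floors list (objective: alternative).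
-- ===== PORT A =====
def pvClamp (value lo hi : Int) : Int :=
  if value < lo then lo else if value > hi then hi else value

def pvFloorDict : PySem.Dict Int Int := PySem.Dict.ofList
  [(0, -1000), (100, -200), (200, 0), (300, 150), (400, 300), (500, 500),
   (600, 700), (700, 800), (800, 900), (900, 1000), (1000, 1000)]

def pvBandsSorted : List Int := [0, 100, 200, 300, 400, 500, 600, 700, 800, 900, 1000]

-- A's for-loop with early break, as structural recursion over the band list
def pvLoopA : List Int → Int → Int → Int
  | [], _, best => best
  | band :: rest, s, best =>
      if (PySem.Dict.get? pvFloorDict band).getD 0 ≤ s then pvLoopA rest s band else best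

def kernel_score_to_api_band (score : Int) : Int :=
  let score_i := pvClamp score (-1000) 1000
  pvLoopA pvBandsSorted score_i 0

-- ===== PORT B =====
def pvFloors : List Int := [-1000, -200, 0, 150, 300, 500, 700, 800, 900, 1000, 1000]

-- hand-rolled bisect_right from Source B; fuel bounds the while-loop (hi - lo shrinks each step)
def pvBisectRight (a : List Int) (x : Int) : Nat → Nat → Nat → Nat
  | _, lo, 0 => lo
  | hi, lo, fuel + 1 =>
      if lo < hi then
        let mid := (lo + hi) / 2
        if x < a.getD mid 0 then pvBisectRight a x mid lo fuel
        else pvBisectRight a x hi (mid + 1) fuel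
      else lo

def kernel_score_to_api_band_alt (score : Int) : Int :=
  let score_i := pvClamp score (-1000) 1000
  pvBandsSorted.getD (pvBisectRight pvFloors score_i 11 0 11 - 1) 0

-- ===== PRECONDITION & SPEC =====
def Spec_kernel_score_to_api_band (score : Int) (out : Int) : Prop := out = kernel_score_to_api_band_alt score
instance (score : Int) (out : Int) : Decidable (Spec_kernel_score_to_api_band score out) := by unfold Spec_kernel_score_to_api_band; infer_instance

-- ===== CLAIM (what is proved, stated in full; the proofs are below) =====
def Claim_equal_kernel_score_to_api_band : Prop := ∀ (score : Int), Dom_kernel_score_to_api_band score → Spec_kernel_score_to_api_band score (kernel_score_to_api_band score)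

-- ===== LEMMAS AND PROOFS =====
set_option maxHeartbeats 4000000 in
set_option maxRecDepth 10000 in
theorem pv_core_fin : ∀ n : Nat, n < 2001 →
    pvLoopA pvBandsSorted ((n : Int) - 1000) 0
      = pvBandsSorted.getD (pvBisectRight pvFloors ((n : Int) - 1000) 11 0 11 - 1) 0 := by
  decide

theorem pv_core (c : Int) (h1 : -1000 ≤ c) (h2 : c ≤ 1000) :
    pvLoopA pvBandsSorted c 0 = pvBandsSorted.getD (pvBisectRight pvFloors c 11 0 11 - 1) 0 := by
  have hn : ((c + 1000).toNat : Int) - 1000 = c := by omega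
  have := pv_core_fin (c + 1000).toNat (by omega)
  rwa [hn] at this

-- ===== VERDICT (by name: the statement is the Claim_ definition above) =====
theorem kernel_score_to_api_band_spec : Claim_equal_kernel_score_to_api_band := by
  intro score _
  unfold Spec_kernel_score_to_api_band kernel_score_to_api_band kernel_score_to_api_band_alt
  refine pv_core _ ?_ ?_ <;> simp only [pvClamp] <;> split_ifs <;> omega
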